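-- pv_equiv track=rewrite | github.com/GabrielGodefroy/sudoku | impl/python/sudoku/grid.py | get_neighboorhood_indices
-- ===== SOURCE A (Python) =====
-- def get_neighboorhood_indices(x: int, y: int) -> set[tuple]:
--     if (x < 0) or (x > 8) or (y < 0) or (y > 8):
--         raise IndexError("Coordinate indices should be between 0 and 8")
--
--     result = set()
--
--     for _x in range(9):
--         result.add((_x, y))
--
--     for _y in range(9):
--         result.add((x, _y))
--
--     x_square_ind = x // 3
--     y_square_ind = y // 3
--
--     for _x in range(3 * x_square_ind, 3 * (x_square_ind + 1)):
--         for _y in range(3 * y_square_ind, 3 * (y_square_ind + 1)):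
--             result.add((_x, _y))
--
--     result.remove((x, y))
--     return sorted(result)
-- ===== SOURCE B (Python) =====
-- def get_neighboorhood_indices(x: int, y: int) -> set[tuple]:
--     if (x < 0) or (x > 8) or (y < 0) or (y > 8):
--         raise IndexError("Coordinate indices should be between 0 and 8")
--     # single pass over all 81 cells with a combined predicate; generation order
--     # (row-major) is already the sorted order, so no sort and no set needed
--     return [(i, j)
--             for i in range(9)
--             for j in range(9)
--             if (i, j) != (x, y)
--             and (i == x or j == y or (i // 3 == x // 3 and j // 3 == y // 3))]
-- ===== Notes on version B (the rewrite author's own statement) =====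
-- stated objective: simpler
-- what changed: B replaces A's three separate add-loops over a mutable set plus remove plus sorted by a single row-major scan of all 81 cells with one combined row/col/box predicate, emitting the result directly in sorted order with no set and no sort.
import Mathlib
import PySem

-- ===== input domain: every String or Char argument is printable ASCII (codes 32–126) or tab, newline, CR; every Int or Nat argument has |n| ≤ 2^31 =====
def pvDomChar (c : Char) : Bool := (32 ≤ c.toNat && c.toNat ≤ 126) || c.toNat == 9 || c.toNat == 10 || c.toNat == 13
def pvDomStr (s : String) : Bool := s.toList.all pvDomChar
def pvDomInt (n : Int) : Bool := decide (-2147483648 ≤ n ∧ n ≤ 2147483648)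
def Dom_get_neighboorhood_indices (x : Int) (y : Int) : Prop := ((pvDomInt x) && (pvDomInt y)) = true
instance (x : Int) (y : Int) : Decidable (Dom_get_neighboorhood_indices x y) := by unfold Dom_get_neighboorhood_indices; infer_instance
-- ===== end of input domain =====

-- B replaces A's three add-loops over a set + remove + sorted by one row-major scan of
-- all 81 cells with a combined predicate, already in sorted order (objective: simpler).

-- ===== PORT A =====
-- transliteration of A: set built by three loops, remove (x,y), then sorted
def get_neighboorhood_indices (x : Int) (y : Int) : List (Int × Int) :=
  let result : PySem.Set (Int × Int) := PySem.Set.empty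
  let result := (PySem.List.pyRange 0 9 1).foldl (fun s _x => PySem.Set.add s (_x, y)) result
  let result := (PySem.List.pyRange 0 9 1).foldl (fun s _y => PySem.Set.add s (x, _y)) result
  let x_square_ind := PySem.Int.floordiv x 3
  let y_square_ind := PySem.Int.floordiv y 3
  let result := (PySem.List.pyRange (3 * x_square_ind) (3 * (x_square_ind + 1)) 1).foldl
    (fun s _x => (PySem.List.pyRange (3 * y_square_ind) (3 * (y_square_ind + 1)) 1).foldl
      (fun s _y => PySem.Set.add s (_x, _y)) s) result
  match PySem.Set.remove? result (x, y) with   -- none = KeyError (unreachable inside Pre_)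
  | none => []
  | some r => PySem.List.sorted2 r (fun p => p.1) (fun p => p.2)

-- ===== PORT B =====
-- transliteration of B: one comprehension over all 81 cells with the combined predicate
def get_neighboorhood_indices_alt (x : Int) (y : Int) : List (Int × Int) :=
  (PySem.List.pyRange 0 9 1).flatMap (fun i =>
    (PySem.List.pyRange 0 9 1).filterMap (fun j =>
      if (i, j) ≠ (x, y) ∧
         (i = x ∨ j = y ∨
          (PySem.Int.floordiv i 3 = PySem.Int.floordiv x 3 ∧
           PySem.Int.floordiv j 3 = PySem.Int.floordiv y 3))
      then some (i, j) else none))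

-- ===== PRECONDITION & SPEC =====
-- Pre_: exactly the inputs on which A returns (A raises IndexError outside 0..8 × 0..8)
def Pre_get_neighboorhood_indices (x : Int) (y : Int) : Prop :=
  0 ≤ x ∧ x ≤ 8 ∧ 0 ≤ y ∧ y ≤ 8
instance (x : Int) (y : Int) : Decidable (Pre_get_neighboorhood_indices x y) := by
  unfold Pre_get_neighboorhood_indices; infer_instance
def pvWitness_get_neighboorhood_indices : Int × Int := (4, 7)

def Spec_get_neighboorhood_indices (x : Int) (y : Int) (out : List (Int × Int)) : Prop := out = get_neighboorhood_indices_alt x y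
instance (x : Int) (y : Int) (out : List (Int × Int)) : Decidable (Spec_get_neighboorhood_indices x y out) := by unfold Spec_get_neighboorhood_indices; infer_instance

-- ===== CLAIM (what is proved, stated in full; the proofs are below) =====
def Claim_equal_get_neighboorhood_indices : Prop := ∀ (x : Int) (y : Int), Dom_get_neighboorhood_indices x y → Pre_get_neighboorhood_indices x y → Spec_get_neighboorhood_indices x y (get_neighboorhood_indices x y)

-- ===== LEMMAS AND PROOFS =====

-- ===== VERDICT (by name: the statement is the Claim_ definition above) =====
theorem get_neighboorhood_indices_spec : Claim_equal_get_neighboorhood_indices := by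
  intro x y _ hpre
  obtain ⟨hx0, hx8, hy0, hy8⟩ := hpre
  unfold Spec_get_neighboorhood_indices
  interval_cases x <;> interval_cases y <;> decide
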